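-- pv_equiv track=rewrite | github.com/eliranabdoo/toto-combinator | optimized_functions.py | choose_parallelization_strategy
-- ===== SOURCE A (Python) =====
-- from itertools import combinations, groupby, product
--
-- def choose_parallelization_strategy(groups, n):
--     """
--     Choose optimal parallelization strategy based on scale analysis.
--
--     Returns "column_level" if C^n >> ∏(M_i), "choice_level" otherwise.
--     """
--     import math
--
--     num_columns = len(groups)
--     num_column_combinations = math.comb(num_columns, n)
--
--     # Calculate max choices per combination
--     max_choices_per_combination = 0
--     for combo in combinations(range(num_columns), n):
--         choices = math.prod(len(groups[i]) for i in combo)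
--         max_choices_per_combination = max(max_choices_per_combination, choices)
--
--     # If column combinations dominate, use column-level parallelization
--     if num_column_combinations > max_choices_per_combination * 10:
--         return "column_level"
--     else:
--         return "choice_level"
-- ===== SOURCE B (Python) =====
-- def choose_parallelization_strategy(groups, n):
--     """
--     Choose optimal parallelization strategy based on scale analysis.
--
--     The maximum product of n group sizes is computed by a memoized
--     take-or-skip recursion over the list of sizes instead of enumerating
--     index combinations.
--     """
--     import math
--
--     k = len(groups)
--     if n > k:
--         # no combination of n columns exists
--         return "choice_level"
--     lens = [len(g) for g in groups]
--     memo = {}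
--
--     def best(i, j):
--         # max product of j sizes among lens[i:], or None if fewer than j remain
--         if j == 0:
--             return 1
--         if i == k:
--             return None
--         if (i, j) not in memo:
--             skip = best(i + 1, j)
--             take = best(i + 1, j - 1)
--             take = None if take is None else take * lens[i]
--             if skip is None:
--                 memo[(i, j)] = take
--             elif take is None:
--                 memo[(i, j)] = skip
--             else:
--                 memo[(i, j)] = max(skip, take)
--         return memo[(i, j)]
--
--     m = best(0, n)
--     max_choices = 0 if m is None else m
--     return "column_level" if math.comb(k, n) > max_choices * 10 else "choice_level"
-- ===== Notes on version B (the rewrite author's own statement) =====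
-- stated objective: alternative
-- what changed: Replaces enumeration of all C(k,n) index combinations by a memoized take-or-skip recursion over the list of group sizes that computes the maximum product of n sizes directly.
import Mathlib
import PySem

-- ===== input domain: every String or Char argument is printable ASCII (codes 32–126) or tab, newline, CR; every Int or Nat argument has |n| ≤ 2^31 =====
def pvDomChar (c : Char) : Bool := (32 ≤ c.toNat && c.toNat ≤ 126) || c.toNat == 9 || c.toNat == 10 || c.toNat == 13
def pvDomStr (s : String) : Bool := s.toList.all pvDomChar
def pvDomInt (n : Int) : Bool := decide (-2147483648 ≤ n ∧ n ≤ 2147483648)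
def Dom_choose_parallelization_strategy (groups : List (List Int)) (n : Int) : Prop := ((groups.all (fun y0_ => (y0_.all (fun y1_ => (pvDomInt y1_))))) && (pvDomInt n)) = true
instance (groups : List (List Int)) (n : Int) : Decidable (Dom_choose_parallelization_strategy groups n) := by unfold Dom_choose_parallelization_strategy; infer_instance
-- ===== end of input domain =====

-- B replaces the enumeration of all C(k,n) index combinations by a take-or-skip
-- recursion over the group sizes (memoized in Python): a different algorithm.

-- ===== PORT A =====
-- itertools.combinations(l, r) in list order: combos containing the head first, then the rest
def pyCombinations (l : List Nat) (r : Nat) : List (List Nat) :=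
  match r, l with
  | 0, _ => [[]]
  | _ + 1, [] => []
  | r + 1, x :: xs => ((pyCombinations xs r).map (fun c => x :: c)) ++ pyCombinations xs (r + 1)
termination_by l.length
decreasing_by all_goals simp

def choose_parallelization_strategy (groups : List (List Int)) (n : Int) : String :=
  let numColumns := groups.length
  let numColumnCombinations := Nat.choose numColumns n.toNat  -- math.comb (n ≥ 0 by Pre_)
  let maxChoices :=
    (pyCombinations (List.range numColumns) n.toNat).foldl
      (fun acc combo =>
        max acc (combo.foldl (fun p i => p * ((groups.getD i []).length : Int)) 1))
      0
  if (numColumnCombinations : Int) > maxChoices * 10 then "column_level" else "choice_level"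

-- ===== PORT B =====
def cpsOptMax (a b : Option Int) : Option Int :=
  match a, b with
  | none, b => b
  | a, none => a
  | some x, some y => some (max x y)

-- best lens j = max product of j sizes taken from lens, none if fewer than j remain
-- (Python's memo dict is a pure cache; the recursion is ported directly)
def cpsBest (lens : List Int) (j : Nat) : Option Int :=
  match j, lens with
  | 0, _ => some 1
  | _ + 1, [] => none
  | j + 1, l :: rest => cpsOptMax (cpsBest rest (j + 1)) ((cpsBest rest j).map (fun p => p * l))
termination_by lens.length
decreasing_by all_goals simp

def choose_parallelization_strategy_alt (groups : List (List Int)) (n : Int) : String :=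
  let k := groups.length
  if n > (k : Int) then "choice_level"
  else
    let lens := groups.map (fun g => (g.length : Int))
    let maxChoices := (cpsBest lens n.toNat).getD 0
    if ((Nat.choose k n.toNat : Int) > maxChoices * 10) then "column_level" else "choice_level"

-- ===== PRECONDITION & SPEC =====
-- Pre_ excludes only n < 0, where Python's math.comb raises ValueError in both A and B.
def Pre_choose_parallelization_strategy (groups : List (List Int)) (n : Int) : Prop := 0 ≤ n
instance (groups : List (List Int)) (n : Int) : Decidable (Pre_choose_parallelization_strategy groups n) := by unfold Pre_choose_parallelization_strategy; infer_instance
def pvWitness_choose_parallelization_strategy : List (List Int) × Int := ([[1], [2, 3]], 1)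

def Spec_choose_parallelization_strategy (groups : List (List Int)) (n : Int) (out : String) : Prop := out = choose_parallelization_strategy_alt groups n
instance (groups : List (List Int)) (n : Int) (out : String) : Decidable (Spec_choose_parallelization_strategy groups n out) := by unfold Spec_choose_parallelization_strategy; infer_instance

-- ===== CLAIM (what is proved, stated in full; the proofs are below) =====
def Claim_equal_choose_parallelization_strategy : Prop := ∀ (groups : List (List Int)) (n : Int), Dom_choose_parallelization_strategy groups n → Pre_choose_parallelization_strategy groups n → Spec_choose_parallelization_strategy groups n (choose_parallelization_strategy groups n)

-- ===== LEMMAS AND PROOFS =====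

-- product of a combo, as A folds it
def prodL (c : List Int) : Int := c.foldl (· * ·) 1

-- optional maximum of the products of a list of combos
def oM : List (List Int) → Option Int
  | [] => none
  | c :: cs => cpsOptMax (some (prodL c)) (oM cs)

theorem cpsOptMax_assoc (a b c : Option Int) :
    cpsOptMax (cpsOptMax a b) c = cpsOptMax a (cpsOptMax b c) := by
  cases a <;> cases b <;> cases c <;> simp [cpsOptMax, max_assoc]

theorem cpsOptMax_comm (a b : Option Int) : cpsOptMax a b = cpsOptMax b a := by
  cases a <;> cases b <;> simp [cpsOptMax, max_comm]

theorem foldl_mul_shift (c : List Int) (a : Int) :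
    c.foldl (· * ·) a = a * c.foldl (· * ·) 1 := by
  induction c generalizing a with
  | nil => simp
  | cons x xs ih => simp only [List.foldl_cons]; rw [ih (a * x), ih (1 * x)]; ring

theorem prodL_cons (x : Int) (c : List Int) : prodL (x :: c) = x * prodL c := by
  simp only [prodL, List.foldl_cons]; rw [foldl_mul_shift c (1 * x)]; ring

theorem oM_append (A B : List (List Int)) : oM (A ++ B) = cpsOptMax (oM A) (oM B) := by
  induction A with
  | nil => simp only [List.nil_append, oM]; rfl
  | cons c cs ih => simp only [List.cons_append, oM, ih, cpsOptMax_assoc]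

theorem oM_map_cons (L : Int) (hL : 0 ≤ L) (cs : List (List Int)) :
    oM (cs.map (fun c => L :: c)) = (oM cs).map (fun p => p * L) := by
  induction cs with
  | nil => simp [oM]
  | cons c cs ih =>
      simp only [List.map_cons, oM, ih, prodL_cons]
      cases h : oM cs with
      | none => simp [cpsOptMax, mul_comm]
      | some q =>
          simp only [Option.map_some, cpsOptMax, Option.some.injEq]
          rcases le_total (prodL c) q with hc | hc
          · rw [max_eq_right hc, max_eq_right (by nlinarith)]
          · rw [max_eq_left hc, max_eq_left (by nlinarith)]; ring

-- combinations of a list of Ints, same recursion as pyCombinations (proof-side mirror)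
def pyCombinationsI (l : List Int) (r : Nat) : List (List Int) :=
  match r, l with
  | 0, _ => [[]]
  | _ + 1, [] => []
  | r + 1, x :: xs => ((pyCombinationsI xs r).map (fun c => x :: c)) ++ pyCombinationsI xs (r + 1)
termination_by l.length
decreasing_by all_goals simp

-- elements of a combination come from the list
theorem memI_of_mem_pyCombinationsI {l : List Int} {r : Nat} {c : List Int} {x : Int}
    (hc : c ∈ pyCombinationsI l r) (hx : x ∈ c) : x ∈ l := by
  induction l generalizing r c with
  | nil =>
      cases r with
      | zero => simp [pyCombinationsI] at hc; subst hc; simp at hx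
      | succ r => simp [pyCombinationsI] at hc
  | cons y ys ih =>
      cases r with
      | zero => simp [pyCombinationsI] at hc; subst hc; simp at hx
      | succ r =>
          simp only [pyCombinationsI, List.mem_append, List.mem_map] at hc
          rcases hc with ⟨c', hc', rfl⟩ | hc
          · rcases List.mem_cons.mp hx with rfl | hx'
            · exact List.mem_cons_self
            · exact List.mem_cons_of_mem _ (ih hc' hx')
          · exact List.mem_cons_of_mem _ (ih hc hx)

-- map commutes with combinations
theorem pyCombinations_map (l : List Nat) (f : Nat → Int) (r : Nat) :
    pyCombinationsI (l.map f) r = (pyCombinations l r).map (List.map f) := by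
  induction l generalizing r with
  | nil => cases r <;> simp [pyCombinations, pyCombinationsI]
  | cons x xs ih =>
      cases r with
      | zero => simp [pyCombinations, pyCombinationsI]
      | succ r =>
          simp only [List.map_cons, pyCombinations, pyCombinationsI, List.map_append,
            List.map_map, ih]
          rfl

-- cpsBest computes the optional max of combo products
theorem cpsBest_eq_oM (lens : List Int) (r : Nat) (hpos : ∀ x ∈ lens, 0 ≤ x) :
    cpsBest lens r = oM (pyCombinationsI lens r) := by
  induction lens generalizing r with
  | nil =>
      cases r with
      | zero => simp [cpsBest, pyCombinationsI, oM, prodL, cpsOptMax]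
      | succ r => simp [cpsBest, pyCombinationsI, oM]
  | cons L rest ih =>
      cases r with
      | zero => simp [cpsBest, pyCombinationsI, oM, prodL, cpsOptMax]
      | succ r =>
          have hL : 0 ≤ L := hpos L (List.mem_cons_self)
          have hrest : ∀ x ∈ rest, 0 ≤ x := fun x hx => hpos x (List.mem_cons_of_mem _ hx)
          have h1 : pyCombinationsI (L :: rest) (r + 1) =
              ((pyCombinationsI rest r).map (fun c => L :: c)) ++ pyCombinationsI rest (r + 1) := by
            simp [pyCombinationsI]
          have h2 : cpsBest (L :: rest) (r + 1) =
              cpsOptMax (cpsBest rest (r + 1)) ((cpsBest rest r).map (fun p => p * L)) := by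
            simp [cpsBest]
          rw [h1, oM_append, oM_map_cons L hL, h2, ih _ hrest, ih _ hrest, cpsOptMax_comm]

theorem oM_some_nonneg {cs : List (List Int)} {q : Int} (h : oM cs = some q)
    (hcs : ∀ c ∈ cs, 0 ≤ prodL c) : 0 ≤ q := by
  induction cs generalizing q with
  | nil => simp [oM] at h
  | cons c cs ih =>
      simp only [oM] at h
      have hc : 0 ≤ prodL c := hcs c (List.mem_cons_self)
      cases h2 : oM cs with
      | none => rw [h2] at h; simp [cpsOptMax] at h; omega
      | some p =>
          have hp : 0 ≤ p := ih h2 (fun d hd => hcs d (List.mem_cons_of_mem _ hd))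
          rw [h2] at h; simp [cpsOptMax] at h; omega

theorem prodL_nonneg {c : List Int} (h : ∀ x ∈ c, 0 ≤ x) : 0 ≤ prodL c := by
  induction c with
  | nil => simp [prodL]
  | cons x xs ih =>
      rw [prodL_cons]
      exact mul_nonneg (h x (List.mem_cons_self)) (ih fun y hy => h y (List.mem_cons_of_mem _ hy))

-- A's running max over the combo products equals the optional max (given nonnegativity)
theorem foldl_max_eq_oM (cs : List (List Int)) (a : Int) (ha : 0 ≤ a)
    (hcs : ∀ c ∈ cs, 0 ≤ prodL c) :
    cs.foldl (fun acc c => max acc (prodL c)) a = max a ((oM cs).getD 0) := by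
  induction cs generalizing a with
  | nil => simp [oM]; omega
  | cons c cs ih =>
      have hc : 0 ≤ prodL c := hcs c (List.mem_cons_self)
      have hcs2 : ∀ d ∈ cs, 0 ≤ prodL d := fun d hd => hcs d (List.mem_cons_of_mem _ hd)
      simp only [List.foldl_cons, oM]
      rw [ih (max a (prodL c)) (le_max_of_le_left ha) hcs2]
      cases h : oM cs with
      | none => simp [cpsOptMax]; omega
      | some q => simp [cpsOptMax]

theorem pyCombinations_empty_of_lt (l : List Nat) (r : Nat) (h : l.length < r) :
    pyCombinations l r = [] := by
  induction l generalizing r with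
  | nil => cases r with
    | zero => omega
    | succ r => simp [pyCombinations]
  | cons x xs ih =>
      cases r with
      | zero => omega
      | succ r =>
          simp only [pyCombinations, List.append_eq_nil_iff, List.map_eq_nil_iff]
          simp only [List.length_cons] at h
          exact ⟨ih r (by omega), ih (r + 1) (by omega)⟩

theorem range_map_getD (l : List (List Int)) :
    (List.range l.length).map (fun i => ((l.getD i []).length : Int)) =
      l.map (fun g => (g.length : Int)) := by
  induction l with
  | nil => simp
  | cons g gs ih =>
      rw [List.length_cons, List.range_succ_eq_map, List.map_cons, List.map_map]
      congr 1

-- ===== VERDICT (by name: the statement is the Claim_ definition above) =====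
theorem choose_parallelization_strategy_spec : Claim_equal_choose_parallelization_strategy := by
  intro groups n _ hpre
  unfold Spec_choose_parallelization_strategy
  unfold choose_parallelization_strategy choose_parallelization_strategy_alt
  simp only []
  set k := groups.length with hk
  have hn0 : 0 ≤ n := hpre
  by_cases hbig : n > (k : Int)
  · -- no combination of size n exists: both sides return "choice_level"
    have hr : k < n.toNat := by omega
    rw [pyCombinations_empty_of_lt _ _ (by simpa using hr)]
    have hch : Nat.choose k n.toNat = 0 := Nat.choose_eq_zero_of_lt hr
    simp [hbig, hch]
  · -- main case: A's max over combinations equals B's take-or-skip recursion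
    have hr : n.toNat ≤ k := by omega
    have hlensnn : ∀ x ∈ groups.map (fun g => (g.length : Int)), 0 ≤ x := by
      intro x hx; simp only [List.mem_map] at hx; rcases hx with ⟨g, _, rfl⟩; positivity
    have hmap : pyCombinationsI (groups.map (fun g => (g.length : Int))) n.toNat =
        (pyCombinations (List.range k) n.toNat).map
          (List.map (fun i => ((groups.getD i []).length : Int))) := by
      rw [← range_map_getD groups, pyCombinations_map]
    have hinner : ∀ combo : List Nat,
        combo.foldl (fun p i => p * ((groups.getD i []).length : Int)) 1 =
          prodL (combo.map (fun i => ((groups.getD i []).length : Int))) := by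
      intro combo; simp [prodL, List.foldl_map]
    have hA : (pyCombinations (List.range k) n.toNat).foldl
          (fun acc combo =>
            max acc (combo.foldl (fun p i => p * ((groups.getD i []).length : Int)) 1)) 0 =
        (cpsBest (groups.map (fun g => (g.length : Int))) n.toNat).getD 0 := by
      have h1 : (pyCombinations (List.range k) n.toNat).foldl
            (fun acc combo =>
              max acc (combo.foldl (fun p i => p * ((groups.getD i []).length : Int)) 1)) 0 =
          ((pyCombinations (List.range k) n.toNat).map
              (List.map (fun i => ((groups.getD i []).length : Int)))).foldl
            (fun acc c => max acc (prodL c)) 0 := by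
        rw [List.foldl_map]
        have hfun : (fun (acc : Int) (combo : List Nat) =>
              max acc (combo.foldl (fun p i => p * ((groups.getD i []).length : Int)) 1)) =
            (fun acc combo =>
              max acc (prodL (combo.map (fun i => ((groups.getD i []).length : Int))))) := by
          funext acc combo; rw [hinner combo]
        rw [hfun]
      rw [h1, ← hmap, cpsBest_eq_oM _ _ hlensnn]
      have hnn : ∀ c ∈ pyCombinationsI (groups.map (fun g => (g.length : Int))) n.toNat,
          0 ≤ prodL c := by
        intro c hc
        exact prodL_nonneg (fun x hx => hlensnn x (memI_of_mem_pyCombinationsI hc hx))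
      rw [foldl_max_eq_oM _ 0 le_rfl hnn]
      cases h : oM (pyCombinationsI (groups.map (fun g => (g.length : Int))) n.toNat) with
      | none => simp
      | some q =>
          have hq : 0 ≤ q := oM_some_nonneg h hnn
          simp; omega
    rw [hA]
    simp [hbig]
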